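-- pv_equiv track=rewrite | github.com/Muvva-Adityavardhan/AI-Powered-Geospatial-Analytics-for-Environmental-Transformations | app.py | extract_metrics_from_query
-- ===== SOURCE A (Python) =====
-- DYNAMIC_WORLD_CLASSES = [
--     "water", "trees", "grass", "flooded_vegetation", "crops",
--     "shrub_and_scrub", "built", "bare", "snow_and_ice"
-- ]
--
-- def extract_metrics_from_query(query):
--     query_lower = query.lower()
--     metrics = []
--
--     if "land cover" in query_lower:
--         return DYNAMIC_WORLD_CLASSES
--
--     if "ndvi" in query_lower and not any(m in query_lower for m in ["nbr", "evi", "ndmi", "mndwi", "land cover"]):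
--         return ["NDVI"]
--     if "nbr" in query_lower and not any(m in query_lower for m in ["ndvi", "evi", "ndmi", "mndwi", "land cover"]):
--         return ["NBR"]
--     if "evi" in query_lower and not any(m in query_lower for m in ["ndvi", "nbr", "ndmi", "mndwi", "land cover"]):
--         return ["EVI"]
--     if "ndmi" in query_lower and not any(m in query_lower for m in ["ndvi", "nbr", "evi", "mndwi", "land cover"]):
--         return ["NDMI"]
--     if "mndwi" in query_lower and not any(m in query_lower for m in ["ndvi", "nbr", "evi", "ndmi", "land cover"]):
--         return ["MNDWI"]
--
--     return ["NDVI"]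
-- ===== SOURCE B (Python) =====
-- DYNAMIC_WORLD_CLASSES = [
--     "water", "trees", "grass", "flooded_vegetation", "crops",
--     "shrub_and_scrub", "built", "bare", "snow_and_ice"
-- ]
--
-- METRIC_MAP = {"ndvi": "NDVI", "nbr": "NBR", "evi": "EVI", "ndmi": "NDMI", "mndwi": "MNDWI"}
--
-- def extract_metrics_from_query(query):
--     q = query.lower()
--     if "land cover" in q:
--         return DYNAMIC_WORLD_CLASSES
--     present = [label for key, label in METRIC_MAP.items() if key in q]
--     return present if len(present) == 1 else ["NDVI"]
-- ===== Notes on version B (the rewrite author's own statement) =====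
-- stated objective: simpler
-- what changed: Replaced five guarded branches (each re-scanning the query for the four other metric names) with a single collection pass over a key->label mapping followed by a size-1 check; the exclusive-match logic becomes 'exactly one key present', otherwise the NDVI fallback.
import Mathlib
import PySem

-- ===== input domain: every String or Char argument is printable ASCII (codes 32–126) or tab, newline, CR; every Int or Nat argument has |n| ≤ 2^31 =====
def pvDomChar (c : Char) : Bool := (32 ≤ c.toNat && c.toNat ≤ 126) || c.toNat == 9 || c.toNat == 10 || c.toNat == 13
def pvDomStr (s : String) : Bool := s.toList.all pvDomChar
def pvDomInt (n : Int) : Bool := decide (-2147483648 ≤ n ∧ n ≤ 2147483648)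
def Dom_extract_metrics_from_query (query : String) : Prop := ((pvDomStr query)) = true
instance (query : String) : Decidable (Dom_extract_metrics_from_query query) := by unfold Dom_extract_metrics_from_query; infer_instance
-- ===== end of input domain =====

-- B replaces A's five mutually-exclusive guarded branches with one collection pass over
-- a key->label mapping plus a size-1 check (objective: simpler).


-- ===== PORT A =====
def DYNAMIC_WORLD_CLASSES : List String :=
  ["water", "trees", "grass", "flooded_vegetation", "crops",
   "shrub_and_scrub", "built", "bare", "snow_and_ice"]

-- body of A after `query_lower = query.lower()` (the unused `metrics = []` is dropped)
def extract_metrics_core (ql : String) : List String :=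
  if PySem.Str.isIn "land cover" ql then DYNAMIC_WORLD_CLASSES
  else if PySem.Str.isIn "ndvi" ql &&
          !(["nbr", "evi", "ndmi", "mndwi", "land cover"].any (fun m => PySem.Str.isIn m ql)) then ["NDVI"]
  else if PySem.Str.isIn "nbr" ql &&
          !(["ndvi", "evi", "ndmi", "mndwi", "land cover"].any (fun m => PySem.Str.isIn m ql)) then ["NBR"]
  else if PySem.Str.isIn "evi" ql &&
          !(["ndvi", "nbr", "ndmi", "mndwi", "land cover"].any (fun m => PySem.Str.isIn m ql)) then ["EVI"]
  else if PySem.Str.isIn "ndmi" ql &&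
          !(["ndvi", "nbr", "evi", "mndwi", "land cover"].any (fun m => PySem.Str.isIn m ql)) then ["NDMI"]
  else if PySem.Str.isIn "mndwi" ql &&
          !(["ndvi", "nbr", "evi", "ndmi", "land cover"].any (fun m => PySem.Str.isIn m ql)) then ["MNDWI"]
  else ["NDVI"]

def extract_metrics_from_query (query : String) : List String :=
  extract_metrics_core (PySem.Str.lower query)

-- ===== PORT B =====
def METRIC_MAP : List (String × String) :=
  [("ndvi", "NDVI"), ("nbr", "NBR"), ("evi", "EVI"), ("ndmi", "NDMI"), ("mndwi", "MNDWI")]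

-- body of B after `q = query.lower()`
def extract_metrics_alt_core (q : String) : List String :=
  if PySem.Str.isIn "land cover" q then DYNAMIC_WORLD_CLASSES
  else
    let present := (METRIC_MAP.filter (fun p => PySem.Str.isIn p.1 q)).map Prod.snd
    if present.length = 1 then present else ["NDVI"]

def extract_metrics_from_query_alt (query : String) : List String :=
  extract_metrics_alt_core (PySem.Str.lower query)

-- ===== PRECONDITION & SPEC =====
def Spec_extract_metrics_from_query (query : String) (out : List String) : Prop := out = extract_metrics_from_query_alt query
instance (query : String) (out : List String) : Decidable (Spec_extract_metrics_from_query query out) := by unfold Spec_extract_metrics_from_query; infer_instance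

-- ===== CLAIM (what is proved, stated in full; the proofs are below) =====
def Claim_equal_extract_metrics_from_query : Prop := ∀ (query : String), Dom_extract_metrics_from_query query → Spec_extract_metrics_from_query query (extract_metrics_from_query query)

-- ===== LEMMAS AND PROOFS =====

-- both cores are boolean-case functions of the six substring tests; 64-way case split
theorem core_eq (ql : String) : extract_metrics_core ql = extract_metrics_alt_core ql := by
  unfold extract_metrics_core extract_metrics_alt_core METRIC_MAP
  cases hlc : PySem.Chars.isIn ['l','a','n','d',' ','c','o','v','e','r'] ql.toList <;>
  cases h1 : PySem.Chars.isIn ['n','d','v','i'] ql.toList <;>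
  cases h2 : PySem.Chars.isIn ['n','b','r'] ql.toList <;>
  cases h3 : PySem.Chars.isIn ['e','v','i'] ql.toList <;>
  cases h4 : PySem.Chars.isIn ['n','d','m','i'] ql.toList <;>
  cases h5 : PySem.Chars.isIn ['m','n','d','w','i'] ql.toList <;>
  simp [hlc, h1, h2, h3, h4, h5, List.any, List.filter]

-- ===== VERDICT (by name: the statement is the Claim_ definition above) =====
theorem extract_metrics_from_query_spec : Claim_equal_extract_metrics_from_query := by
  intro q _
  unfold Spec_extract_metrics_from_query extract_metrics_from_query extract_metrics_from_query_alt
  exact core_eq _
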